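-- pv_equiv track=rewrite | github.com/SumitDixitSD/DS101Algorithms | Randomized Algorithms/Randomized Hiring Problem.py | hire
-- ===== SOURCE A (Python) =====
-- def hire(candidate_list):
--     '''
--     Function to calculate the hiring cost of a hiring a candidate from a list of candidates using randomized algorithm technique
--     input : an integer list of candidates
--     output : total cost of interviewing the candidates and hiring one of them
--     '''
--     #creating and initializing variables to denote hiring cost and interviewing cost.
--     interview_cost = 0
--     hiring_cost = 0
--
--     #let us use a dummy candidate 0 and assume that he.she is the best at the start of the hiring process
--     best_c = 0
--
--     for candidate in candidate_list:
--         # increment interviewing cost by 1 each time a new candidate is interviewed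
--         interview_cost = interview_cost + 1
--
--         if candidate > best_c:
--             best_c = candidate         #change the best candidate everytime the above condition is satisfied
--
--             hiring_cost = hiring_cost + 1   #increment hiring cost by 1 each time we get a candidate who is better than the previous best candidate
--
--     total_cost = interview_cost + hiring_cost  #compute the total cost of hiring 1 candidate after interviewing the candidates and choosing amongst them
--
--     return total_cost
-- ===== SOURCE B (Python) =====
-- def hire(candidate_list):
--     # Build the prefix-maximum table (dummy best 0 first), then count
--     # strict increases between adjacent entries; total = interviews + hires.
--     running = [0]
--     for candidate in candidate_list:
--         running.append(max(running[-1], candidate))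
--     hires = 0
--     for prev, cur in zip(running, running[1:]):
--         if cur > prev:
--             hires += 1
--     return len(candidate_list) + hires
-- ===== Notes on version B (the rewrite author's own statement) =====
-- stated objective: alternative
-- what changed: Replaced the fused single loop holding (interview_cost, hiring_cost, best_c) state by two separate passes: build the prefix-maximum table starting from the dummy 0, then count strict increases between adjacent table entries and add len(candidate_list).
import Mathlib
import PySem

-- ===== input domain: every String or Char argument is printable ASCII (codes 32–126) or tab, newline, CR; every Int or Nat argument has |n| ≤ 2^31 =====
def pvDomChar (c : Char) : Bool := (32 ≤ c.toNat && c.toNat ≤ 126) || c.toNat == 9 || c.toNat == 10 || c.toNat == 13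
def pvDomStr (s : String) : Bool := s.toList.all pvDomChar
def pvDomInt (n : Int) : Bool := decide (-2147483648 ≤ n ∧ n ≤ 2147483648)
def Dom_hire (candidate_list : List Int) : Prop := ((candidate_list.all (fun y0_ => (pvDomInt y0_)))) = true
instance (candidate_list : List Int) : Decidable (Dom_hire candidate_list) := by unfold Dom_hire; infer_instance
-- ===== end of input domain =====

-- B replaces A's fused single-state loop by a prefix-maximum table pass plus an
-- adjacent-increase counting pass (alternative decomposition, same O(n) cost).


-- ===== PORT A =====
-- literal transliteration: one fold over candidates with state (interview_cost, hiring_cost, best_c)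
def hire (candidate_list : List Int) : Int :=
  let st := candidate_list.foldl
    (fun (st : Int × Int × Int) candidate =>
      let interview_cost := st.1 + 1
      if candidate > st.2.2 then (interview_cost, st.2.1 + 1, candidate)
      else (interview_cost, st.2.1, st.2.2))
    (0, 0, 0)
  st.1 + st.2.1

-- ===== PORT B =====
-- Source B pass 1: running = [0]; for c: running.append(max(running[-1], c))
-- (running is never empty, so running[-1] = getLastD _ 0 exactly)
def hireRunning (candidate_list : List Int) : List Int :=
  candidate_list.foldl (fun r candidate => r ++ [max (r.getLastD 0) candidate]) [0]

-- Source B pass 2: for prev, cur in zip(running, running[1:]): if cur > prev: hires += 1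
-- (running[1:] of a nonempty list is exactly its tail)
def hire_alt (candidate_list : List Int) : Int :=
  let running := hireRunning candidate_list
  let hires := (running.zip running.tail).foldl
    (fun hires pc => if pc.2 > pc.1 then hires + 1 else hires) 0
  (candidate_list.length : Int) + hires

-- ===== PRECONDITION & SPEC =====
def Spec_hire (candidate_list : List Int) (out : Int) : Prop := out = hire_alt candidate_list
instance (candidate_list : List Int) (out : Int) : Decidable (Spec_hire candidate_list out) := by unfold Spec_hire; infer_instance

-- ===== CLAIM (what is proved, stated in full; the proofs are below) =====
def Claim_equal_hire : Prop := ∀ (candidate_list : List Int), Dom_hire candidate_list → Spec_hire candidate_list (hire candidate_list)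

-- ===== LEMMAS AND PROOFS =====

-- number of hires when the current best is b
def gAux (b : Int) : List Int → Int
  | [] => 0
  | c :: t => if c > b then 1 + gAux c t else gAux b t

-- strict increases between adjacent elements
def incCount : List Int → Int
  | a :: b :: t => (if b > a then 1 else 0) + incCount (b :: t)
  | _ => 0

theorem foldA_eq (l : List Int) : ∀ ic hc b,
    l.foldl (fun (st : Int × Int × Int) candidate =>
      let interview_cost := st.1 + 1
      if candidate > st.2.2 then (interview_cost, st.2.1 + 1, candidate)
      else (interview_cost, st.2.1, st.2.2)) (ic, hc, b)
    = (ic + l.length, hc + gAux b l, (l.foldl (fun x c => max x c) b)) := by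
  induction l with
  | nil => intro ic hc b; simp [gAux]
  | cons c t ih =>
    intro ic hc b
    simp only [List.foldl_cons, List.length_cons]
    by_cases h : c > b
    · rw [if_pos h, ih]
      have hm : max b c = c := by omega
      rw [gAux, if_pos h, hm]
      simp only [Prod.mk.injEq, and_true]
      push_cast
      omega
    · rw [if_neg h, ih]
      have hm : max b c = b := by omega
      rw [gAux, if_neg h, hm]
      simp only [Prod.mk.injEq, and_true]
      push_cast
      omega

theorem zipfold_eq (l : List Int) : ∀ acc : Int,
    (l.zip l.tail).foldl (fun hires pc => if pc.2 > pc.1 then hires + 1 else hires) acc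
    = acc + incCount l := by
  induction l with
  | nil => intro acc; simp [incCount]
  | cons a t ih =>
    intro acc
    cases t with
    | nil => simp [incCount]
    | cons b t' =>
      simp only [List.tail_cons, List.zip_cons_cons, List.foldl_cons]
      rw [show (List.zip (b :: t') t') = ((b :: t').zip (b :: t').tail) from rfl, ih]
      simp only [incCount]
      split_ifs <;> omega

theorem incCount_append (r : List Int) (m : Int) (hr : r ≠ []) :
    incCount (r ++ [m]) = incCount r + (if m > r.getLastD 0 then 1 else 0) := by
  induction r with
  | nil => exact absurd rfl hr
  | cons a t ih =>
    cases t with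
    | nil =>
      show incCount [a, m] = incCount [a] + (if m > a then 1 else 0)
      simp only [incCount]
      split_ifs <;> omega
    | cons b t' =>
      have ih' := ih (by simp)
      have hlast : (a :: b :: t').getLastD 0 = (b :: t').getLastD 0 := rfl
      show (if b > a then 1 else 0) + incCount ((b :: t') ++ [m])
        = ((if b > a then 1 else 0) + incCount (b :: t')) + (if m > (a :: b :: t').getLastD 0 then 1 else 0)
      rw [ih', hlast]
      split_ifs <;> omega

theorem getLastD_append_single (r : List Int) (m : Int) :
    (r ++ [m]).getLastD 0 = m := by
  induction r with
  | nil => rfl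
  | cons a t ih =>
    cases t with
    | nil => rfl
    | cons b t' => simpa using ih

theorem build_eq (l : List Int) : ∀ r : List Int, r ≠ [] →
    incCount (l.foldl (fun r candidate => r ++ [max (r.getLastD 0) candidate]) r)
    = incCount r + gAux (r.getLastD 0) l := by
  induction l with
  | nil => intro r _; simp [gAux]
  | cons c t ih =>
    intro r hr
    simp only [List.foldl_cons]
    have hne : r ++ [max (r.getLastD 0) c] ≠ [] := by simp
    rw [ih _ hne, incCount_append r _ hr, getLastD_append_single, gAux]
    by_cases h : c > r.getLastD 0
    · have hm : max (r.getLastD 0) c = c := by omega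
      rw [hm, if_pos h, if_pos h]
      omega
    · have hm : max (r.getLastD 0) c = r.getLastD 0 := by omega
      rw [hm, if_neg h, if_neg (lt_irrefl (r.getLastD 0)), add_zero]

-- ===== VERDICT (by name: the statement is the Claim_ definition above) =====
theorem hire_spec : Claim_equal_hire := by
  intro l _
  unfold Spec_hire
  show hire l = hire_alt l
  simp only [hire, hire_alt, hireRunning]
  rw [foldA_eq, zipfold_eq, build_eq l [0] (by simp)]
  have : ([0] : List Int).getLastD 0 = 0 := rfl
  rw [this]
  simp only [incCount]
  omega
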